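-- pv_equiv track=rewrite | github.com/Mirko-343/Ejercicios-Prog-I | modelo_parcial/modulo/funciones.py | calcular_evento_mas_realizado
-- ===== SOURCE A (Python) =====
-- def calcular_evento_mas_realizado(matriz_salon : list, salon : str) -> str :
--     ''' Caclula el evento mas realizado en cada salon. Recibe como parammetro una matriz con:
--         - id de evento en la primer fila
--         - tipo de evento en la segunda fila
--         - el salon del evento en la tercer fila
--         Como segundo parametro recibe el nombre del salon para el cual se quiere realizar la busqueda.
--         Devuelve un string con el nombre del mayor evento realizado en ese salon'''
--
--
--
--     for i in range(len(matriz_salon[1])):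
--         if i == 0:
--             mayor_evento = matriz_salon[1][i]
--             evento = matriz_salon[0][i]
--         elif matriz_salon[1][i] > mayor_evento:
--             mayor_evento = matriz_salon[1][i]
--             evento = matriz_salon[0][i]
--
--     return evento
-- ===== SOURCE B (Python) =====
-- def calcular_evento_mas_realizado(matriz_salon: list, salon: str) -> str:
--     fila = matriz_salon[1]
--     mayor = max(fila)
--     return matriz_salon[0][fila.index(mayor)]
-- ===== Notes on version B (the rewrite author's own statement) =====
-- stated objective: simpler
-- what changed: Replaces A's single fused index loop carrying two running variables by two standard-library passes: max() over the event row, then .index() to locate its first occurrence, then one id lookup.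
import Mathlib
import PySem

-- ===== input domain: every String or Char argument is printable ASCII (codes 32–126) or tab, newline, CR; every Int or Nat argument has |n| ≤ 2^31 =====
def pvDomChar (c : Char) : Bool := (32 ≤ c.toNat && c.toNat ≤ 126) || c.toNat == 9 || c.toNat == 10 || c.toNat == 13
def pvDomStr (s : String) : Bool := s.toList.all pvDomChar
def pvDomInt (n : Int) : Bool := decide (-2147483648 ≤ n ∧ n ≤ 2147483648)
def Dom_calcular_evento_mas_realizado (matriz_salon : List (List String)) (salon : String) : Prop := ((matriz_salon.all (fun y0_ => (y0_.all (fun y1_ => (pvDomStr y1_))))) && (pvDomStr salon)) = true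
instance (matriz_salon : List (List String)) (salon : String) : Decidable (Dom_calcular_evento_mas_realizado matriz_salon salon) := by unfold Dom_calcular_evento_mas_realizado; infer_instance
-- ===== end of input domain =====

-- B replaces A's fused running-maximum loop by two library passes (max, then first index); objective: simpler.

-- ===== PORT A =====
-- loop body of A: state = none while 'mayor_evento'/'evento' are unbound, some (mayor, evento) after
def pvStepA (row0 row1 : List String) (st : Option (String × String)) (i : Int) : Option (String × String) :=
  if i = 0 then
    some (PySem.List.pyGetD row1 i "", PySem.List.pyGetD row0 i "")
  else
    match st with
    | some (mayor, evento) =>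
        if mayor < PySem.List.pyGetD row1 i "" then
          some (PySem.List.pyGetD row1 i "", PySem.List.pyGetD row0 i "")
        else some (mayor, evento)
    | none => none

def calcular_evento_mas_realizado (matriz_salon : List (List String)) (salon : String) : String :=
  match (PySem.List.pyRange 0 (((PySem.List.pyGetD matriz_salon 1 []).length : Nat) : Int) 1).foldl
      (pvStepA (PySem.List.pyGetD matriz_salon 0 []) (PySem.List.pyGetD matriz_salon 1 [])) none with
  | some (_, evento) => evento
  | none => ""     -- unreachable under Pre_ (Python: UnboundLocalError on empty row 1)

-- ===== PORT B =====
def calcular_evento_mas_realizado_alt (matriz_salon : List (List String)) (salon : String) : String :=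
  match PySem.List.max? (PySem.List.pyGetD matriz_salon 1 []) (fun y => y) with
  | none => ""     -- unreachable under Pre_ (Python: ValueError from max([]))
  | some mayor =>
    match PySem.List.index? (PySem.List.pyGetD matriz_salon 1 []) mayor with
    | none => ""   -- unreachable: max? returns a member
    | some idx => PySem.List.pyGetD (PySem.List.pyGetD matriz_salon 0 []) (idx : Int) ""

-- ===== PRECONDITION & SPEC =====
-- Pre_ excludes exactly the inputs where Python raises: fewer than two rows (IndexError), an empty
-- event row (A: UnboundLocalError, B: ValueError), or an id row too short to hold the position of the
-- event row's first maximum (IndexError in both).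
def Pre_calcular_evento_mas_realizado (matriz_salon : List (List String)) (salon : String) : Prop :=
  2 ≤ matriz_salon.length ∧ (matriz_salon.getD 1 []) ≠ [] ∧
    (matriz_salon.getD 1 []).idxOf
        ((matriz_salon.getD 1 []).foldl (fun a b => if a.toList < b.toList then b else a) "")
      < (matriz_salon.getD 0 []).length
instance (matriz_salon : List (List String)) (salon : String) : Decidable (Pre_calcular_evento_mas_realizado matriz_salon salon) := by unfold Pre_calcular_evento_mas_realizado; infer_instance

def pvWitness_calcular_evento_mas_realizado : List (List String) × String :=
  ([["id1", "id2", "id3"], ["b", "c", "a"], ["s", "s", "s"]], "s")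

def Spec_calcular_evento_mas_realizado (matriz_salon : List (List String)) (salon : String) (out : String) : Prop := out = calcular_evento_mas_realizado_alt matriz_salon salon
instance (matriz_salon : List (List String)) (salon : String) (out : String) : Decidable (Spec_calcular_evento_mas_realizado matriz_salon salon out) := by unfold Spec_calcular_evento_mas_realizado; infer_instance

-- ===== CLAIM (what is proved, stated in full; the proofs are below) =====
def Claim_equal_calcular_evento_mas_realizado : Prop := ∀ (matriz_salon : List (List String)) (salon : String), Dom_calcular_evento_mas_realizado matriz_salon salon → Pre_calcular_evento_mas_realizado matriz_salon salon → Spec_calcular_evento_mas_realizado matriz_salon salon (calcular_evento_mas_realizado matriz_salon salon)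

-- ===== LEMMAS AND PROOFS =====

-- proof-side worker: running maximum with its first index (mv = current max, mi = its index, k = next index)
def pvBest : List String → String → Nat → Nat → String × Nat
  | [], mv, mi, _ => (mv, mi)
  | y :: ys, mv, mi, k => if mv < y then pvBest ys y k (k + 1) else pvBest ys mv mi (k + 1)

theorem pvBest_fst : ∀ (t : List String) (mv : String) (mi k : Nat),
    (pvBest t mv mi k).1 = t.foldl max mv := by
  intro t
  induction t with
  | nil => intro mv mi k; rfl
  | cons y ys ih =>
    intro mv mi k
    by_cases h : mv < y
    · simp [pvBest, h, ih, max_eq_right (le_of_lt h)]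
    · simp [pvBest, h, ih, max_eq_left (le_of_not_gt h)]

theorem pvBest_index : ∀ (t pre : List String) (mv : String) (mi : Nat),
    PySem.List.index? pre mv = some mi → (∀ z ∈ pre, z ≤ mv) →
    PySem.List.index? (pre ++ t) (pvBest t mv mi pre.length).1 = some (pvBest t mv mi pre.length).2 := by
  intro t
  induction t with
  | nil => intro pre mv mi h1 _; simpa [pvBest] using h1
  | cons y ys ih =>
    intro pre mv mi h1 h2
    by_cases h : mv < y
    · have hy : y ∉ pre := fun hmem => absurd (h2 y hmem) (not_le_of_gt h)
      have h1' : PySem.List.index? (pre ++ [y]) y = some pre.length :=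
        PySem.List.index?_append_singleton_self (l := pre) (c := y) hy
      have h2' : ∀ z ∈ pre ++ [y], z ≤ y := by
        intro z hz
        rcases List.mem_append.mp hz with hz | hz
        · exact le_of_lt (lt_of_le_of_lt (h2 z hz) h)
        · simp at hz; simp [hz]
      have := ih (pre ++ [y]) y pre.length h1' h2'
      simpa [pvBest, h, List.append_assoc] using this
    · have hmem : mv ∈ pre := by
        obtain ⟨p, sfx, hps, -, -⟩ := (PySem.List.index?_eq_some_iff pre mv mi).mp h1
        simp [hps]
      have h1' : PySem.List.index? (pre ++ [y]) mv = some mi := by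
        rw [PySem.List.index?_append_of_mem [y] hmem]; exact h1
      have h2' : ∀ z ∈ pre ++ [y], z ≤ mv := by
        intro z hz
        rcases List.mem_append.mp hz with hz | hz
        · exact h2 z hz
        · simp at hz; simp [hz, le_of_not_gt h]
      have := ih (pre ++ [y]) mv mi h1' h2'
      simpa [pvBest, h, List.append_assoc] using this

theorem pvFold_best (row0 row1 : List String) : ∀ (t : List String) (k : Nat) (mv : String) (mi : Nat),
    1 ≤ k → row1.drop k = t →
    (PySem.List.pyRange (k : Int) (row1.length : Int) 1).foldl (pvStepA row0 row1)
        (some (mv, PySem.List.pyGetD row0 (mi : Int) ""))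
      = some ((pvBest t mv mi k).1, PySem.List.pyGetD row0 (((pvBest t mv mi k).2 : Nat) : Int) "") := by
  intro t
  induction t with
  | nil =>
    intro k mv mi hk hdrop
    have hlen : row1.length ≤ k := List.drop_eq_nil_iff.mp hdrop
    rw [PySem.List.pyRange_one_eq_nil (by exact_mod_cast hlen)]
    simp [pvBest]
  | cons y ys ih =>
    intro k mv mi hk hdrop
    have hklt : k < row1.length := by
      by_contra hc
      rw [List.drop_eq_nil_iff.mpr (le_of_not_gt (by simpa using hc))] at hdrop
      exact List.cons_ne_nil y ys hdrop.symm
    have hdrop' : row1.drop (k + 1) = ys := by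
      have := congrArg (List.drop 1) hdrop
      simpa [List.drop_drop, Nat.add_comm] using this
    have hget : PySem.List.pyGetD row1 (k : Int) "" = y := by
      have hy : row1[k]? = some y := by
        have := congrArg (fun l => l[0]?) hdrop
        simpa [List.getElem?_drop] using this
      simp [PySem.List.pyGetD, PySem.List.pyGet?_natCast, hy]
    rw [PySem.List.pyRange_one_cons (by exact_mod_cast hklt)]
    simp only [List.foldl_cons]
    have hk0 : k ≠ 0 := by omega
    by_cases h : mv < y
    · have hstep : pvStepA row0 row1 (some (mv, PySem.List.pyGetD row0 (mi : Int) "")) (k : Int)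
          = some (y, PySem.List.pyGetD row0 (k : Int) "") := by
        simp [pvStepA, hk0, hget, h]
      rw [hstep]
      have := ih (k + 1) y k (by omega) hdrop'
      rw [show ((k : Nat) + 1 : Int) = ((k + 1 : Nat) : Int) by push_cast; ring]
      simpa [pvBest, h] using this
    · have hstep : pvStepA row0 row1 (some (mv, PySem.List.pyGetD row0 (mi : Int) "")) (k : Int)
          = some (mv, PySem.List.pyGetD row0 (mi : Int) "") := by
        simp [pvStepA, hk0, hget, h]
      rw [hstep]
      have := ih (k + 1) mv mi (by omega) hdrop'
      rw [show ((k : Nat) + 1 : Int) = ((k + 1 : Nat) : Int) by push_cast; ring]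
      simpa [pvBest, h] using this

theorem pv_ports_eq (matriz_salon : List (List String)) (salon : String) :
    calcular_evento_mas_realizado matriz_salon salon
      = calcular_evento_mas_realizado_alt matriz_salon salon := by
  unfold calcular_evento_mas_realizado calcular_evento_mas_realizado_alt
  generalize PySem.List.pyGetD matriz_salon 1 [] = row1
  generalize hrow0 : PySem.List.pyGetD matriz_salon 0 [] = row0
  cases row1 with
  | nil => rfl
  | cons x t =>
    -- A side
    have hfold := pvFold_best row0 (x :: t) t 1 x 0 (le_refl 1) (by simp)
    norm_num at hfold
    rw [PySem.List.pyRange_one_cons (by exact_mod_cast Nat.succ_pos t.length)]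
    simp only [List.foldl_cons]
    have hstep0 : pvStepA row0 (x :: t) none 0 = some (x, PySem.List.pyGetD row0 0 "") := by
      simp [pvStepA, PySem.List.pyGetD]
    rw [hstep0]
    norm_num
    rw [hfold]
    -- B side
    have hmax : PySem.List.max? (x :: t) (fun y => y) = some (pvBest t x 0 1).1 := by
      rw [PySem.List.max?_id_cons, pvBest_fst]
    have hidx : PySem.List.index? (x :: t) (pvBest t x 0 1).1 = some (pvBest t x 0 1).2 := by
      have := pvBest_index t [x] x 0 (by simp) (by simp)
      simpa using this
    rw [hmax, PySem.List.index?_eq_idxOf?] at *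
    simp [hidx]

-- ===== VERDICT (by name: the statement is the Claim_ definition above) =====
theorem calcular_evento_mas_realizado_spec : Claim_equal_calcular_evento_mas_realizado := by
  intro matriz_salon salon _ _
  unfold Spec_calcular_evento_mas_realizado
  exact pv_ports_eq matriz_salon salon
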